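-- pv_equiv track=rewrite | github.com/AdamBalski/impulses | server/src/ai/pulselang_parser.py | _read_node
-- ===== SOURCE A (Python) =====
-- def _read_node(tokens: list[tuple[str, str]], index: int) -> int:
--     token_type, token_value = tokens[index]
--     if token_type in {"number", "string", "symbol"}:
--         return index + 1
--     if token_type == "paren":
--         if token_value == "(":
--             index += 1
--             while index < len(tokens):
--                 next_type, next_value = tokens[index]
--                 if next_type == "paren" and next_value == ")":
--                     return index + 1
--                 index = _read_node(tokens, index)
--             raise ValueError("Unbalanced parentheses in DSL expression")
--         raise ValueError("Unexpected closing parenthesis")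
--     raise ValueError("Unexpected token in DSL expression")
-- ===== SOURCE B (Python) =====
-- def _read_node(tokens: list[tuple[str, str]], index: int) -> int:
--     token_type, token_value = tokens[index]
--     if token_type in ("number", "string", "symbol"):
--         return index + 1
--     if token_type != "paren":
--         raise ValueError("Unexpected token in DSL expression")
--     if token_value != "(":
--         raise ValueError("Unexpected closing parenthesis")
--     depth = 1
--     index += 1
--     while index < len(tokens):
--         t, v = tokens[index]
--         if t == "paren":
--             if v == "(":
--                 depth += 1
--             elif v == ")":
--                 depth -= 1
--                 if depth == 0:
--                     return index + 1
--             else: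
--                 raise ValueError("Unexpected closing parenthesis")
--         elif t not in ("number", "string", "symbol"):
--             raise ValueError("Unexpected token in DSL expression")
--         index += 1
--     raise ValueError("Unbalanced parentheses in DSL expression")
-- ===== Notes on version B (the rewrite author's own statement) =====
-- stated objective: alternative
-- what changed: A parses a parenthesised group by recursive descent (the while-loop re-invokes _read_node on each child node); B does a single iterative scan with an explicit depth counter and no recursion.
import Mathlib
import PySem

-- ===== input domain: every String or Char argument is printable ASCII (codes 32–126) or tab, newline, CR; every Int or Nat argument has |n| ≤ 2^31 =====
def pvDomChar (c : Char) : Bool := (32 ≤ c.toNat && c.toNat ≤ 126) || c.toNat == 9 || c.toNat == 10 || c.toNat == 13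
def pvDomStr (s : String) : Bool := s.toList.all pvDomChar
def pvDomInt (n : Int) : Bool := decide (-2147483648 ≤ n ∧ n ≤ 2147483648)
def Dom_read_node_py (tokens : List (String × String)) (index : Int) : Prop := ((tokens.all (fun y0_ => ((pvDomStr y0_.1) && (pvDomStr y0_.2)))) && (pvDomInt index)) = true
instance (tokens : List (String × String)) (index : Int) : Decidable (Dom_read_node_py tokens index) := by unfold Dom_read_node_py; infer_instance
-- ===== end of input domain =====

-- B replaces A's recursive descent by a single iterative scan with an explicit depth counter (objective: alternative).
-- Raising paths of the Pythons are modelled as `none` in the Option-valued helpers and excluded by Pre_.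

-- ===== PORT A =====
-- Literal port of A; `none` = the raised IndexError / ValueError.
mutual
  def readNodeA (tokens : List (String × String)) (index : Int) : Option Int :=
    match hidx : PySem.List.pyGet? tokens index with
    | none => none                                      -- tokens[index] raises IndexError
    | some (token_type, token_value) =>
      if token_type = "number" ∨ token_type = "string" ∨ token_type = "symbol" then
        some (index + 1)
      else if token_type = "paren" then
        if token_value = "(" then loopA tokens (index + 1)
        else none                                       -- raise "Unexpected closing parenthesis"
      else none                                         -- raise "Unexpected token in DSL expression"
  termination_by (((tokens.length : Int) - index).toNat, 0)
  decreasing_by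
    have : -(tokens.length : Int) ≤ index ∧ index < tokens.length := by
      by_contra hc
      have := (PySem.List.pyGet?_eq_none_iff (xs := tokens) (i := index)).2
        (by simpa [PySem.Raise.InRange] using hc)
      rw [this] at hidx; exact absurd hidx (by simp)
    apply Prod.Lex.left; omega

  -- the `while index < len(tokens)` loop of A
  def loopA (tokens : List (String × String)) (i : Int) : Option Int :=
    if _h : i < (tokens.length : Int) then
      match PySem.List.pyGet? tokens i with
      | none => none
      | some (next_type, next_value) =>
        if next_type = "paren" ∧ next_value = ")" then some (i + 1)
        else
          match readNodeA tokens i with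
          | none => none
          | some j => if _hj : i < j then loopA tokens j else none  -- guard only for totality; recursion always advances
    else none                                           -- raise "Unbalanced parentheses"
  termination_by (((tokens.length : Int) - i).toNat, 1)
  decreasing_by
    · apply Prod.Lex.right'; omega; omega
    · apply Prod.Lex.left; omega
end

def read_node_py (tokens : List (String × String)) (index : Int) : Int :=
  (readNodeA tokens index).getD 0

-- ===== PORT B =====
-- Literal port of Source B: one scan with a depth counter.
def loopB (tokens : List (String × String)) (i : Int) (depth : Int) : Option Int :=
  if _h : i < (tokens.length : Int) then
    match PySem.List.pyGet? tokens i with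
    | none => none
    | some (t, v) =>
      if t = "paren" then
        if v = "(" then loopB tokens (i + 1) (depth + 1)
        else if v = ")" then
          if depth - 1 = 0 then some (i + 1) else loopB tokens (i + 1) (depth - 1)
        else none                                       -- raise "Unexpected closing parenthesis"
      else if t = "number" ∨ t = "string" ∨ t = "symbol" then loopB tokens (i + 1) depth
      else none                                         -- raise "Unexpected token in DSL expression"
  else none                                             -- raise "Unbalanced parentheses"
termination_by (((tokens.length : Int) - i).toNat)
decreasing_by all_goals omega

def readNodeB (tokens : List (String × String)) (index : Int) : Option Int :=
  match PySem.List.pyGet? tokens index with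
  | none => none
  | some (token_type, token_value) =>
    if token_type = "number" ∨ token_type = "string" ∨ token_type = "symbol" then
      some (index + 1)
    else if token_type ≠ "paren" then none
    else if token_value ≠ "(" then none
    else loopB tokens (index + 1) 1

def read_node_py_alt (tokens : List (String × String)) (index : Int) : Int :=
  (readNodeB tokens index).getD 0

-- ===== PRECONDITION & SPEC =====
-- Pre_ = exactly the inputs on which the Python A returns (otherwise it raises IndexError/ValueError):
-- index in Python range, and the token there is an atom, or an opening paren followed by a
-- balanced, well-formed group (depth stays positive until a closing paren brings it to 0).
def pvTokAt (tokens : List (String × String)) (p : Int) : String × String :=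
  (PySem.List.pyGet? tokens p).getD ("", "")
def pvAtom (t : String) : Bool := t == "number" || t == "string" || t == "symbol"
def pvDelta (tv : String × String) : Int :=
  if tv.1 = "paren" then (if tv.2 = "(" then 1 else if tv.2 = ")" then -1 else 0) else 0
def pvOk (tv : String × String) : Bool :=
  pvAtom tv.1 || (tv.1 == "paren" && (tv.2 == "(" || tv.2 == ")"))
def pvDepth (tokens : List (String × String)) (index : Int) (k : Nat) : Int :=
  1 + (((List.range k).map (fun o => pvDelta (pvTokAt tokens (index + 1 + o)))).sum)

def Pre_read_node_py (tokens : List (String × String)) (index : Int) : Prop :=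
  (-(tokens.length : Int) ≤ index ∧ index < (tokens.length : Int)) ∧
  (pvAtom (pvTokAt tokens index).1 = true ∨
    ((pvTokAt tokens index).1 = "paren" ∧ (pvTokAt tokens index).2 = "(" ∧
      ∃ k < ((tokens.length : Int) - (index + 1)).toNat,
        pvTokAt tokens (index + 1 + k) = ("paren", ")") ∧
        pvDepth tokens index (k + 1) = 0 ∧
        (∀ o ≤ k, pvOk (pvTokAt tokens (index + 1 + o)) = true) ∧
        (∀ o ≤ k, 1 ≤ pvDepth tokens index o)))
instance (tokens : List (String × String)) (index : Int) : Decidable (Pre_read_node_py tokens index) := by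
  unfold Pre_read_node_py; infer_instance

def pvWitness_read_node_py : (List (String × String)) × Int := ([("number", "1")], 0)

def Spec_read_node_py (tokens : List (String × String)) (index : Int) (out : Int) : Prop := out = read_node_py_alt tokens index
instance (tokens : List (String × String)) (index : Int) (out : Int) : Decidable (Spec_read_node_py tokens index out) := by unfold Spec_read_node_py; infer_instance

-- ===== CLAIM (what is proved, stated in full; the proofs are below) =====
def Claim_equal_read_node_py : Prop := ∀ (tokens : List (String × String)) (index : Int), Dom_read_node_py tokens index → Pre_read_node_py tokens index → Spec_read_node_py tokens index (read_node_py tokens index)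

-- ===== LEMMAS AND PROOFS =====

-- B's loop only moves forward.
theorem loopB_gt : ∀ (n : Nat) (tokens : List (String × String)) (i d j : Int),
    (((tokens.length : Int) - i).toNat) < n → loopB tokens i d = some j → i < j := by
  intro n
  induction n with
  | zero => intro tokens i d j h; omega
  | succ n ih =>
    intro tokens i d j h hB
    rw [loopB] at hB
    split at hB
    · rename_i hlt
      cases hg : PySem.List.pyGet? tokens i with
      | none => rw [hg] at hB; simp at hB
      | some tv =>
        rw [hg] at hB
        obtain ⟨t, v⟩ := tv
        simp only at hB
        split_ifs at hB <;>
          first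
            | (simp only [Option.some.injEq] at hB; omega)
            | (have := ih tokens (i + 1) _ j (by omega) hB; omega)
    · simp at hB

-- Splitting B's depth counter: scanning at depth d+1 first closes one group (depth 1), then continues at depth d.
theorem loopB_split : ∀ (n : Nat) (tokens : List (String × String)) (i d : Int),
    (((tokens.length : Int) - i).toNat) < n → 1 ≤ d →
    loopB tokens i (d + 1) = (loopB tokens i 1).bind (fun j => loopB tokens j d) := by
  intro n
  induction n with
  | zero => intro tokens i d h; omega
  | succ n ih =>
    intro tokens i d h hd
    rw [loopB, loopB.eq_def (depth := 1)]
    split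
    · rename_i hlt
      cases hg : PySem.List.pyGet? tokens i with
      | none => simp
      | some tv =>
        obtain ⟨t, v⟩ := tv
        simp only
        by_cases hp : t = "paren"
        · simp only [hp, if_true]
          by_cases ho : v = "("
          · simp only [ho, if_true]
            -- pointwise: loopB j (d+1) = (loopB j 1).bind (loopB · d) for j reached from i+1
            have e1 : loopB tokens (i + 1) (1 + 1) =
                (loopB tokens (i + 1) 1).bind (fun j => loopB tokens j 1) :=
              ih tokens (i + 1) 1 (by omega) (by omega)
            rw [ih tokens (i + 1) (d + 1) (by omega) (by omega), e1, Option.bind_assoc]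
            cases hj : loopB tokens (i + 1) 1 with
            | none => simp
            | some j =>
              have hji : i + 1 < j := loopB_gt (((tokens.length : Int) - (i + 1)).toNat + 1) tokens (i + 1) 1 j (by omega) hj
              simp only [Option.bind_some]
              exact ih tokens j d (by omega) hd
          · simp only [ho, if_false]
            by_cases hc : v = ")"
            · simp only [hc, if_true]
              have : ¬ (d + 1 - 1 = 0) := by omega
              simp only [this, if_false]
              norm_num
            · simp [hc]
        · simp only [hp, if_false]
          by_cases ha : t = "number" ∨ t = "string" ∨ t = "symbol"
          · simp only [ha, if_true]
            exact ih tokens (i + 1) d (by omega) hd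
          · simp [ha]
    · simp

-- A's loop (recursive descent) computes the same as B's loop at depth 1.
theorem loopA_eq_loopB : ∀ (n : Nat) (tokens : List (String × String)) (i : Int),
    (((tokens.length : Int) - i).toNat) < n → loopA tokens i = loopB tokens i 1 := by
  intro n
  induction n with
  | zero => intro tokens i h; omega
  | succ n ih =>
    intro tokens i h
    rw [loopA, loopB]
    split
    · rename_i hlt
      cases hg : PySem.List.pyGet? tokens i with
      | none => simp
      | some tv =>
        obtain ⟨t, v⟩ := tv
        simp only
        by_cases hp : t = "paren"
        · by_cases hc : v = ")"
          · simp [hp, hc]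
          · have hnc : ¬ (t = "paren" ∧ v = ")") := by simp [hp, hc]
            simp only [if_false, hp, if_true, hc]
            rw [readNodeA, hg]
            have hna : ¬ (t = "number" ∨ t = "string" ∨ t = "symbol") := by
              subst hp; simp
            simp only [hp, if_true]
            by_cases ho : v = "("
            · simp only [ho, if_true]
              have hA : loopA tokens (i + 1) = loopB tokens (i + 1) 1 := ih tokens (i + 1) (by omega)
              rw [hA, loopB_split (((tokens.length : Int) - (i + 1)).toNat + 1) tokens (i + 1) 1 (by omega) (by omega)]
              cases hj : loopB tokens (i + 1) 1 with
              | none => simp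
              | some j =>
                have hji : i + 1 < j := loopB_gt (((tokens.length : Int) - (i + 1)).toNat + 1) tokens (i + 1) 1 j (by omega) hj
                have hguard : i < j := by omega
                simp [hguard]
                exact ih tokens j (by omega)
            · simp [ho]
        · have hnc : ¬ (t = "paren" ∧ v = ")") := by simp [hp]
          simp only [if_false, hp]
          rw [readNodeA, hg]
          by_cases ha : t = "number" ∨ t = "string" ∨ t = "symbol"
          · simp only [ha, if_true]
            have hguard : i < i + 1 := by omega
            simp only [dif_pos hguard]
            exact ih tokens (i + 1) (by omega)
          · simp [ha, hp]
    · simp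

theorem readNodeA_eq_readNodeB (tokens : List (String × String)) (index : Int) :
    readNodeA tokens index = readNodeB tokens index := by
  rw [readNodeA, readNodeB]
  cases hg : PySem.List.pyGet? tokens index with
  | none => rfl
  | some tv =>
    obtain ⟨t, v⟩ := tv
    simp only
    by_cases ha : t = "number" ∨ t = "string" ∨ t = "symbol"
    · simp [ha]
    · simp only [ha, if_false]
      by_cases hp : t = "paren"
      · simp only [hp, if_true, ne_eq, not_true, if_false]
        by_cases ho : v = "("
        · simp only [ho, if_true, not_true, if_false]
          exact loopA_eq_loopB (((tokens.length : Int) - (index + 1)).toNat + 1) tokens (index + 1) (by omega)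
        · simp [ho]
      · simp [hp]

-- ===== VERDICT (by name: the statement is the Claim_ definition above) =====
theorem read_node_py_spec : Claim_equal_read_node_py := by
  intro tokens index _ _
  unfold Spec_read_node_py read_node_py read_node_py_alt
  rw [readNodeA_eq_readNodeB]
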